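-- pv_equiv track=rewrite | github.com/AnnaVasuykova/Python | index.py | find_division_index
-- ===== SOURCE A (Python) =====
-- def find_division_index(arr):
--     left = 0
--     right = len(arr)-1
--
--
--     while left<=right:
--         mid = (left+right) // 2
--
--
--         if arr[mid] == 0 and arr[mid+1] == 1:
--             return mid+1
--         elif arr[mid] == 0:
--             left = mid + 1
--         else:
--             right = mid -1
--
--     return - 1
-- ===== SOURCE B (Python) =====
-- def find_division_index(arr):
--     def go(lo, hi):
--         if lo > hi:
--             return -1
--         mid = lo + (hi - lo) // 2
--         if arr[mid] != 0:
--             return go(lo, mid - 1)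
--         if arr[mid + 1] == 1:
--             return mid + 1
--         return go(mid + 1, hi)
--     return go(0, len(arr) - 1)
-- ===== Notes on version B (the rewrite author's own statement) =====
-- stated objective: alternative
-- what changed: The iterative while-loop binary search is rewritten as a recursive divide-and-conquer helper go(lo, hi) with an inverted, reordered decision tree (empty-range early return, arr[mid] != 0 checked first) and the overflow-safe midpoint lo + (hi - lo) // 2 instead of (lo + hi) // 2.
import Mathlib
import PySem

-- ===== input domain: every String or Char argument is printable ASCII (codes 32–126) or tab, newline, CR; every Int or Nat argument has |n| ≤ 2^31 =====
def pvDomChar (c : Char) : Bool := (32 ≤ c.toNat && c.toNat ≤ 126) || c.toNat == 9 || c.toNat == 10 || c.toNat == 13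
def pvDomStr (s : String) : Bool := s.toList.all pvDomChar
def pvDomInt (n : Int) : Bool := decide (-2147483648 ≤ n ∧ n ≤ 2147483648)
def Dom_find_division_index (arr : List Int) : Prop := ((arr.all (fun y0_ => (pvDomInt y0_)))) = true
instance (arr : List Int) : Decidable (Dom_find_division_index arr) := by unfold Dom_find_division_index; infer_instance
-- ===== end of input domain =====

-- B rewrites A's iterative binary search as a recursive divide-and-conquer helper with a
-- reordered decision tree and the overflow-safe midpoint lo + (hi-lo)//2; same probes, same value.

-- ===== PORT A =====
-- the while loop of A, state (left, right); arr[...] via pyGetD (all accesses in range under Pre_)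
def fdiLoopA (arr : List Int) (left right : Int) : Int :=
  if _h : left ≤ right then
    let mid := PySem.Int.floordiv (left + right) 2
    if PySem.List.pyGetD arr mid 0 = 0 ∧ PySem.List.pyGetD arr (mid + 1) 0 = 1 then
      mid + 1
    else if PySem.List.pyGetD arr mid 0 = 0 then
      fdiLoopA arr (mid + 1) right
    else
      fdiLoopA arr left (mid - 1)
  else
    -1
termination_by (right + 1 - left).toNat
decreasing_by
  · have := PySem.Int.floordiv_two_mid_bounds (lo := left) (hi := right) _h
    omega
  · have := PySem.Int.floordiv_two_mid_bounds (lo := left) (hi := right) _h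
    omega

def find_division_index (arr : List Int) : Int :=
  fdiLoopA arr 0 (PySem.List.len arr - 1)

-- ===== PORT B =====
-- recursive helper go(lo, hi) of Source B: early return on empty range, branch on arr[mid] != 0 first
def fdiGoB (arr : List Int) (lo hi : Int) : Int :=
  if _h : lo > hi then
    -1
  else
    let mid := lo + PySem.Int.floordiv (hi - lo) 2
    if PySem.List.pyGetD arr mid 0 ≠ 0 then
      fdiGoB arr lo (mid - 1)
    else if PySem.List.pyGetD arr (mid + 1) 0 = 1 then
      mid + 1
    else
      fdiGoB arr (mid + 1) hi
termination_by (hi + 1 - lo).toNat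
decreasing_by
  · have := PySem.Int.floordiv_two_mid_bounds (lo := 0) (hi := hi - lo) (by omega)
    rw [zero_add] at this; omega
  · have := PySem.Int.floordiv_two_mid_bounds (lo := 0) (hi := hi - lo) (by omega)
    rw [zero_add] at this; omega

def find_division_index_alt (arr : List Int) : Int :=
  fdiGoB arr 0 (PySem.List.len arr - 1)

-- ===== PRECONDITION & SPEC =====
-- A raises IndexError exactly when its search walks the right spine (right pinned at len-1,
-- each probed element 0 with the following element ≠ 1) up to the last element and finds 0 there,
-- so that arr[mid+1] reads one past the end; fdiSpineRaises enumerates exactly those spine probes.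
-- structural recursion: the spine's left pointer strictly increases and stays ≤ len-1,
-- so the spine has at most arr.length probes; steps counts the probes still allowed.
def fdiSpineRaises (arr : List Int) (steps : Nat) (left : Int) : Bool :=
  match steps with
  | 0 => false
  | steps + 1 =>
    if left ≤ PySem.List.len arr - 1 then
      let mid := PySem.Int.floordiv (left + (PySem.List.len arr - 1)) 2
      if mid = PySem.List.len arr - 1 then
        PySem.List.pyGetD arr mid 0 == 0
      else
        (PySem.List.pyGetD arr mid 0 == 0) && (PySem.List.pyGetD arr (mid + 1) 0 != 1)
          && fdiSpineRaises arr steps (mid + 1)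
    else
      false

-- Pre_ excludes exactly the inputs on which Python A (and B alike) raises IndexError.
def Pre_find_division_index (arr : List Int) : Prop :=
  fdiSpineRaises arr arr.length 0 = false
instance (arr : List Int) : Decidable (Pre_find_division_index arr) := by
  unfold Pre_find_division_index; infer_instance

def pvWitness_find_division_index : List Int := [0, 0, 1, 1]

def Spec_find_division_index (arr : List Int) (out : Int) : Prop := out = find_division_index_alt arr
instance (arr : List Int) (out : Int) : Decidable (Spec_find_division_index arr out) := by unfold Spec_find_division_index; infer_instance

-- ===== CLAIM (what is proved, stated in full; the proofs are below) =====
def Claim_equal_find_division_index : Prop := ∀ (arr : List Int), Dom_find_division_index arr → Pre_find_division_index arr → Spec_find_division_index arr (find_division_index arr)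

-- ===== LEMMAS AND PROOFS =====

-- the two midpoint expressions coincide: lo + (hi - lo) // 2 = (lo + hi) // 2
theorem fdi_mid_eq (lo hi : Int) :
    lo + PySem.Int.floordiv (hi - lo) 2 = PySem.Int.floordiv (lo + hi) 2 := by
  rw [PySem.Int.floordiv_eq_ediv_of_pos (by omega), PySem.Int.floordiv_eq_ediv_of_pos (by omega)]
  omega

theorem fdiLoopA_eq_fdiGoB (arr : List Int) (left right : Int) :
    fdiLoopA arr left right = fdiGoB arr left right := by
  rw [fdiLoopA, fdiGoB]
  by_cases hle : left ≤ right
  · rw [dif_pos hle, dif_neg (show ¬ left > right by omega)]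
    simp only [fdi_mid_eq left right]
    set mid := PySem.Int.floordiv (left + right) 2 with hmid
    by_cases h0 : PySem.List.pyGetD arr mid 0 = 0
    · by_cases h1 : PySem.List.pyGetD arr (mid + 1) 0 = 1
      · simp only [h0, h1, and_self, if_true, ne_eq, not_true_eq_false, if_false]
      · simp only [h0, h1, and_false, if_false, if_true, ne_eq, not_true_eq_false]
        exact fdiLoopA_eq_fdiGoB arr (mid + 1) right
    · simp only [h0, false_and, if_false, ne_eq, not_false_eq_true, if_true]
      exact fdiLoopA_eq_fdiGoB arr left (mid - 1)
  · rw [dif_neg hle, dif_pos (show left > right by omega)]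
termination_by (right + 1 - left).toNat
decreasing_by
  · have := PySem.Int.floordiv_two_mid_bounds (lo := left) (hi := right) hle
    omega
  · have := PySem.Int.floordiv_two_mid_bounds (lo := left) (hi := right) hle
    omega

-- ===== VERDICT (by name: the statement is the Claim_ definition above) =====
theorem find_division_index_spec : Claim_equal_find_division_index := by
  intro arr _ _
  unfold Spec_find_division_index find_division_index find_division_index_alt
  exact fdiLoopA_eq_fdiGoB arr 0 (PySem.List.len arr - 1)
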